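-- pv_equiv track=rewrite | github.com/HECBioSim/Longbow | Longbow/corelibs/scheduling.py | _checkcomplete
-- ===== SOURCE A (Python) =====
-- def _checkcomplete(jobs):
--     """Check if all the jobs are complete."""
--     # Initialise variables
--     allcomplete = False
--     allfinished = False
--     complete = []
--     error = []
--     finished = []
--
--     for job in jobs:
--
--         if jobs[job]["laststatus"] != "Submit Error":
--
--             complete.append(jobs[job]["laststatus"])
--
--         if (jobs[job]["laststatus"] != "Submit Error" and
--                 jobs[job]["laststatus"] != "Complete"):
--
--             finished.append(jobs[job]["laststatus"])
--
--         if jobs[job]["laststatus"] == "Submit Error":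
--
--             error.append(jobs[job]["laststatus"])
--
--     if all(state == "Complete" for state in complete) and len(complete) != 0:
--
--         allcomplete = True
--
--     if len(error) == len(jobs):
--
--         allcomplete = True
--
--     if all(state == "Finished" for state in finished) and len(finished) != 0:
--
--         allfinished = True
--
--     return allcomplete, allfinished
-- ===== SOURCE B (Python) =====
-- def _checkcomplete(jobs):
--     """Check if all the jobs are complete."""
--     total = err = comp = fin = 0
--     for job in jobs:
--         s = jobs[job]["laststatus"]
--         total += 1
--         if s == "Submit Error":
--             err += 1
--         elif s == "Complete":
--             comp += 1
--         elif s == "Finished":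
--             fin += 1
--     allcomplete = (comp == total - err and err < total) or err == total
--     allfinished = (fin == total - err - comp and total - err - comp > 0)
--     return allcomplete, allfinished
-- ===== Notes on version B (the rewrite author's own statement) =====
-- stated objective: simpler
-- what changed: Replaces the three materialised status lists and the two all()-scans by four integer counters maintained in one pass, with both flags computed arithmetically from the counts.
import Mathlib
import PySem

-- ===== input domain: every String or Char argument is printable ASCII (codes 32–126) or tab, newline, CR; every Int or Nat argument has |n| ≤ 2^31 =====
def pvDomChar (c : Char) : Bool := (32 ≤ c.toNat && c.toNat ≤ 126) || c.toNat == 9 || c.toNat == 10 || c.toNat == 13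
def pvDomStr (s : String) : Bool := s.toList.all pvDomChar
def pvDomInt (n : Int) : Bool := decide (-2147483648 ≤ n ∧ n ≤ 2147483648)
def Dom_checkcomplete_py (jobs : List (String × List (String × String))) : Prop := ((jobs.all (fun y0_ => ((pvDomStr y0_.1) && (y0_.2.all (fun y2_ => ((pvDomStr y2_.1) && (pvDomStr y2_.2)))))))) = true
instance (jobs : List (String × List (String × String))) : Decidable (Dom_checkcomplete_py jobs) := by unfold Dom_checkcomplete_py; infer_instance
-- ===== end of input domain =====

-- B replaces A's three materialised status lists and all()-scans by four counters in one pass;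
-- both flags are computed arithmetically from the counts (objective: simpler).


-- shared accessor: the Python expression jobs[job]["laststatus"] (dict lookups, first match)
def pvStatus (jobs : List (String × List (String × String))) (p : String × List (String × String)) : String :=
  PySem.Dict.getD (PySem.Dict.mk (PySem.Dict.getD (PySem.Dict.mk jobs) p.1 [])) "laststatus" ""

-- ===== PORT A =====
def checkcomplete_py (jobs : List (String × List (String × String))) : Bool × Bool :=
  let res := jobs.foldl
    (fun (acc : List String × List String × List String) job =>
      let s := pvStatus jobs job
      let complete := if s != "Submit Error" then acc.1 ++ [s] else acc.1
      let finished := if s != "Submit Error" && s != "Complete" then acc.2.1 ++ [s] else acc.2.1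
      let error := if s == "Submit Error" then acc.2.2 ++ [s] else acc.2.2
      (complete, finished, error))
    ([], [], [])
  let allcomplete := false
  let allfinished := false
  let allcomplete := if res.1.all (fun state => state == "Complete") && res.1.length != 0 then true else allcomplete
  let allcomplete := if res.2.2.length == jobs.length then true else allcomplete
  let allfinished := if res.2.1.all (fun state => state == "Finished") && res.2.1.length != 0 then true else allfinished
  (allcomplete, allfinished)

-- ===== PORT B =====
def checkcomplete_py_alt (jobs : List (String × List (String × String))) : Bool × Bool :=
  let c := jobs.foldl
    (fun (acc : Nat × Nat × Nat × Nat) job =>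
      let s := pvStatus jobs job
      if s == "Submit Error" then (acc.1 + 1, acc.2.1 + 1, acc.2.2.1, acc.2.2.2)
      else if s == "Complete" then (acc.1 + 1, acc.2.1, acc.2.2.1 + 1, acc.2.2.2)
      else if s == "Finished" then (acc.1 + 1, acc.2.1, acc.2.2.1, acc.2.2.2 + 1)
      else (acc.1 + 1, acc.2.1, acc.2.2.1, acc.2.2.2))
    (0, 0, 0, 0)
  let total := c.1
  let err := c.2.1
  let comp := c.2.2.1
  let fin := c.2.2.2
  ((comp == total - err && decide (err < total)) || err == total,
   fin == total - err - comp && decide (0 < total - err - comp))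

-- ===== PRECONDITION & SPEC =====
-- Pre_ excludes association lists with duplicate job keys (a Python dict cannot contain them, so
-- A's behaviour on such lists is not defined by the source) and jobs whose record lacks the
-- "laststatus" key, on which A raises KeyError.
def Pre_checkcomplete_py (jobs : List (String × List (String × String))) : Prop :=
  (jobs.map Prod.fst).Nodup ∧ ∀ p ∈ jobs, (PySem.Dict.get? (PySem.Dict.mk p.2) "laststatus").isSome
instance (jobs : List (String × List (String × String))) : Decidable (Pre_checkcomplete_py jobs) := by unfold Pre_checkcomplete_py; infer_instance

def pvWitness_checkcomplete_py : (List (String × List (String × String))) :=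
  [("job1", [("laststatus", "Complete")]), ("job2", [("laststatus", "Submit Error")])]

def Spec_checkcomplete_py (jobs : List (String × List (String × String))) (out : Bool × Bool) : Prop := out = checkcomplete_py_alt jobs
instance (jobs : List (String × List (String × String))) (out : Bool × Bool) : Decidable (Spec_checkcomplete_py jobs out) := by unfold Spec_checkcomplete_py; infer_instance

-- ===== CLAIM (what is proved, stated in full; the proofs are below) =====
def Claim_equal_checkcomplete_py : Prop := ∀ (jobs : List (String × List (String × String))), Dom_checkcomplete_py jobs → Pre_checkcomplete_py jobs → Spec_checkcomplete_py jobs (checkcomplete_py jobs)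

-- ===== LEMMAS AND PROOFS =====

-- A's fold builds the three filtered lists
lemma foldA (l : List String) (a b c : List String) :
    l.foldl
      (fun (acc : List String × List String × List String) s =>
        (if s != "Submit Error" then acc.1 ++ [s] else acc.1,
         if s != "Submit Error" && s != "Complete" then acc.2.1 ++ [s] else acc.2.1,
         if s == "Submit Error" then acc.2.2 ++ [s] else acc.2.2)) (a, b, c)
    = (a ++ l.filter (fun s => s != "Submit Error"),
       b ++ l.filter (fun s => s != "Submit Error" && s != "Complete"),
       c ++ l.filter (fun s => s == "Submit Error")) := by
  induction l generalizing a b c with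
  | nil => simp
  | cons s t ih =>
    simp only [List.foldl_cons, List.filter_cons, ih]
    by_cases h1 : s = "Submit Error" <;> by_cases h2 : s = "Complete" <;>
      simp [h1, h2]

-- B's fold computes the four counts as filter lengths
lemma foldB (l : List String) (t e c f : Nat) :
    l.foldl
      (fun (acc : Nat × Nat × Nat × Nat) s =>
        if s == "Submit Error" then (acc.1 + 1, acc.2.1 + 1, acc.2.2.1, acc.2.2.2)
        else if s == "Complete" then (acc.1 + 1, acc.2.1, acc.2.2.1 + 1, acc.2.2.2)
        else if s == "Finished" then (acc.1 + 1, acc.2.1, acc.2.2.1, acc.2.2.2 + 1)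
        else (acc.1 + 1, acc.2.1, acc.2.2.1, acc.2.2.2)) (t, e, c, f)
    = (t + l.length,
       e + (l.filter (fun s => s == "Submit Error")).length,
       c + (l.filter (fun s => s == "Complete")).length,
       f + (l.filter (fun s => s == "Finished")).length) := by
  induction l generalizing t e c f with
  | nil => simp
  | cons s u ih =>
    simp only [List.foldl_cons, List.filter_cons]
    by_cases h1 : s = "Submit Error" <;> by_cases h2 : s = "Complete" <;>
      by_cases h3 : s = "Finished" <;>
      simp_all <;> omega

-- all elements equal c iff the sublist of c's is the whole list
lemma all_eq_len (c : String) (xs : List String) :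
    xs.all (fun s => s == c) = ((xs.filter (fun s => s == c)).length == xs.length) := by
  induction xs with
  | nil => simp
  | cons x t ih =>
    by_cases h : x = c
    · simp [h, ih]
    · have hc := List.length_filter_le (fun s => s == c) t
      have hb : (x == c) = false := by simp [h]
      simp [hb]
      omega

-- the three classes partition the list
lemma partC (l : List String) :
    (l.filter (fun s => s != "Submit Error")).length
      + (l.filter (fun s => s == "Submit Error")).length = l.length := by
  induction l with
  | nil => simp
  | cons s t ih =>
    by_cases h : s = "Submit Error" <;> simp [h] <;> omega

lemma partF (l : List String) :
    (l.filter (fun s => s != "Submit Error" && s != "Complete")).length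
      + (l.filter (fun s => s == "Submit Error")).length
      + (l.filter (fun s => s == "Complete")).length = l.length := by
  induction l with
  | nil => simp
  | cons s t ih =>
    by_cases h1 : s = "Submit Error" <;> by_cases h2 : s = "Complete" <;>
      simp_all <;> omega

-- "Complete" elements all survive the ≠ "Submit Error" filter
lemma filter_comm_C (l : List String) :
    ((l.filter (fun s => s != "Submit Error")).filter (fun s => s == "Complete")).length
      = (l.filter (fun s => s == "Complete")).length := by
  induction l with
  | nil => simp
  | cons s t ih =>
    by_cases h1 : s = "Submit Error" <;> by_cases h2 : s = "Complete" <;>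
      simp_all

lemma filter_comm_F (l : List String) :
    ((l.filter (fun s => s != "Submit Error" && s != "Complete")).filter (fun s => s == "Finished")).length
      = (l.filter (fun s => s == "Finished")).length := by
  induction l with
  | nil => simp
  | cons s t ih =>
    by_cases h1 : s = "Submit Error" <;> by_cases h2 : s = "Complete" <;>
      by_cases h3 : s = "Finished" <;> simp_all

-- ===== VERDICT (by name: the statement is the Claim_ definition above) =====
theorem checkcomplete_py_spec : Claim_equal_checkcomplete_py := by
  intro jobs _ _
  unfold Spec_checkcomplete_py
  simp only [checkcomplete_py, checkcomplete_py_alt]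
  have hmapA : jobs.foldl
      (fun (acc : List String × List String × List String) job =>
        let s := pvStatus jobs job
        (if s != "Submit Error" then acc.1 ++ [s] else acc.1,
         if s != "Submit Error" && s != "Complete" then acc.2.1 ++ [s] else acc.2.1,
         if s == "Submit Error" then acc.2.2 ++ [s] else acc.2.2)) ([], [], [])
      = (jobs.map (pvStatus jobs)).foldl
      (fun (acc : List String × List String × List String) s =>
        (if s != "Submit Error" then acc.1 ++ [s] else acc.1,
         if s != "Submit Error" && s != "Complete" then acc.2.1 ++ [s] else acc.2.1,
         if s == "Submit Error" then acc.2.2 ++ [s] else acc.2.2)) ([], [], []) := by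
    rw [List.foldl_map]
  have hmapB : jobs.foldl
      (fun (acc : Nat × Nat × Nat × Nat) job =>
        let s := pvStatus jobs job
        if s == "Submit Error" then (acc.1 + 1, acc.2.1 + 1, acc.2.2.1, acc.2.2.2)
        else if s == "Complete" then (acc.1 + 1, acc.2.1, acc.2.2.1 + 1, acc.2.2.2)
        else if s == "Finished" then (acc.1 + 1, acc.2.1, acc.2.2.1, acc.2.2.2 + 1)
        else (acc.1 + 1, acc.2.1, acc.2.2.1, acc.2.2.2)) (0, 0, 0, 0)
      = (jobs.map (pvStatus jobs)).foldl
      (fun (acc : Nat × Nat × Nat × Nat) s =>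
        if s == "Submit Error" then (acc.1 + 1, acc.2.1 + 1, acc.2.2.1, acc.2.2.2)
        else if s == "Complete" then (acc.1 + 1, acc.2.1, acc.2.2.1 + 1, acc.2.2.2)
        else if s == "Finished" then (acc.1 + 1, acc.2.1, acc.2.2.1, acc.2.2.2 + 1)
        else (acc.1 + 1, acc.2.1, acc.2.2.1, acc.2.2.2)) (0, 0, 0, 0) := by
    rw [List.foldl_map]
  rw [hmapA, hmapB, foldA, foldB]
  simp only [List.nil_append, Nat.zero_add, List.length_map]
  simp only [Bool.if_false_right, Bool.decide_eq_true, Bool.and_true, Bool.if_true_left]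
  have hC := partC (jobs.map (pvStatus jobs))
  have hF := partF (jobs.map (pvStatus jobs))
  have hcc := filter_comm_C (jobs.map (pvStatus jobs))
  have hcf := filter_comm_F (jobs.map (pvStatus jobs))
  have h1 := List.length_filter_le (fun s => s == "Complete")
    ((jobs.map (pvStatus jobs)).filter (fun s => s != "Submit Error"))
  have h2 := List.length_filter_le (fun s => s == "Finished")
    ((jobs.map (pvStatus jobs)).filter (fun s => s != "Submit Error" && s != "Complete"))
  rw [hcc] at h1
  rw [hcf] at h2
  simp only [List.length_map] at hC hF
  rw [all_eq_len "Complete", all_eq_len "Finished", hcc, hcf]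
  refine Prod.ext ?_ ?_ <;> rw [Bool.eq_iff_iff] <;>
    simp only [Bool.and_eq_true, Bool.or_eq_true, beq_iff_eq, bne_iff_ne, ne_eq,
      decide_eq_true_eq] <;> omega
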